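-- pv_equiv track=rewrite | github.com/nuti23/FLCD | lab3/Scanner.py | get_string_token_from_line
-- ===== SOURCE A (Python) =====
-- def get_string_token_from_line(line, index):
--     string = ''
--     qoutes = 0
--     while index < len(line) and qoutes < 2:
--         if line[index] == '\'':
--             qoutes += 1
--         string += line[index]
--         index += 1
--     return string, index
-- ===== SOURCE B (Python) =====
-- def get_string_token_from_line(line, index):
--     if index >= len(line):
--         return '', index
--     p1 = line.find("'", index)
--     if p1 == -1:
--         return line[index:], len(line)
--     p2 = line.find("'", p1 + 1)
--     if p2 == -1:
--         return line[index:], len(line)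
--     return line[index:p2 + 1], p2 + 1
-- ===== Notes on version B (the rewrite author's own statement) =====
-- stated objective: faster
-- what changed: Replaced the char-by-char accumulation loop counting quotes with two str.find calls locating the first and second quote and a single slice.
-- intended difference: For -len(line) <= index < 0 A's negative indexing wraps, so A re-reads characters from the start of the line and returns a duplicated string with a wrapped index, while B treats index as a slice start and returns just the tail token, the intended value. — e.g. on get_string_token_from_line("a'", -1): A returns ("'a'", 2), B returns ("'", 2)
import Mathlib
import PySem

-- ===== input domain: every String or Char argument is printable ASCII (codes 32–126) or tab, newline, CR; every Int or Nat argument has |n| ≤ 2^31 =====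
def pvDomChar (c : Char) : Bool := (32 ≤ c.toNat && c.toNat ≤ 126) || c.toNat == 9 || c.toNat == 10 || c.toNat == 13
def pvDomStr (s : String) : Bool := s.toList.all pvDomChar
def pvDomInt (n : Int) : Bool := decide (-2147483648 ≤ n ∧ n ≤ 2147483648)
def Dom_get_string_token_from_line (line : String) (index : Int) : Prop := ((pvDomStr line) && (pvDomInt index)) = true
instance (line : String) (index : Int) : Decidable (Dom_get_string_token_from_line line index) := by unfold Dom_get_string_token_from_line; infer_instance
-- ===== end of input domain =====

-- B replaces A's char-by-char accumulation loop by two str.find calls and one slice (measured faster in a timing run);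
-- equivalence of the RETURN value is proved for index ≥ 0; for -len ≤ index < 0 (A's negative-index wraparound) B's value is the intended one (D_ below).

-- ===== PORT A =====
-- while loop → fuel recursion; fuel = (len(line) - index).toNat bounds the iteration count exactly
-- (the loop increments index up to len(line)), so the fuel guard never fires on a run Python completes.
def pvGoA (cs : List Char) (fuel : Nat) (index : Int) (string : List Char) (quotes : Nat) : List Char × Int :=
  match fuel with
  | 0 => (string, index)
  | fuel + 1 =>
    if index < (cs.length : Int) ∧ quotes < 2 then
      match PySem.List.pyGet? cs index with
      | some c => pvGoA cs fuel (index + 1) (string ++ [c]) (if c = '\'' then quotes + 1 else quotes)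
      | none => (string, index)   -- Python raises IndexError here (index < -len(line)); excluded by Pre_
    else (string, index)

def get_string_token_from_line (line : String) (index : Int) : String × Int :=
  let r := pvGoA line.toList ((line.toList.length : Int) - index).toNat index [] 0
  (String.ofList r.1, r.2)

-- ===== PORT B =====
def get_string_token_from_line_alt (line : String) (index : Int) : String × Int :=
  if PySem.Str.len line ≤ index then ("", index)
  else
    let p1 := PySem.Str.findFrom line "'" index
    if p1 = -1 then (PySem.Str.slice line (some index) none, PySem.Str.len line)
    else
      let p2 := PySem.Str.findFrom line "'" (p1 + 1)
      if p2 = -1 then (PySem.Str.slice line (some index) none, PySem.Str.len line)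
      else (PySem.Str.slice line (some index) (some (p2 + 1)), p2 + 1)

-- ===== PRECONDITION & SPEC =====
-- A raises IndexError (line[index] with index < -len(line)) exactly when index < -len(line); Pre_ excludes those inputs.
def Pre_get_string_token_from_line (line : String) (index : Int) : Prop :=
  -(line.length : Int) ≤ index
instance (line : String) (index : Int) : Decidable (Pre_get_string_token_from_line line index) := by
  unfold Pre_get_string_token_from_line; infer_instance

def pvWitness_get_string_token_from_line : String × Int := ("a := 'x' + b", 5)

-- For -len(line) ≤ index < 0 A's negative indexing wraps, so A re-reads characters from the start of the
-- line and returns a duplicated string and a wrapped index, while B treats index as a slice start and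
-- returns the tail token — the intended value.
def D_get_string_token_from_line (line : String) (index : Int) : Prop := index < 0
instance (line : String) (index : Int) : Decidable (D_get_string_token_from_line line index) := by
  unfold D_get_string_token_from_line; infer_instance

def Spec_get_string_token_from_line (line : String) (index : Int) (out : String × Int) : Prop :=
  ¬ D_get_string_token_from_line line index → out = get_string_token_from_line_alt line index
instance (line : String) (index : Int) (out : String × Int) : Decidable (Spec_get_string_token_from_line line index out) := by
  unfold Spec_get_string_token_from_line; infer_instance

def pvDiffWitness_get_string_token_from_line : String × Int := ("a'", -1)
def pvDiffWitnessOut_get_string_token_from_line : (String × Int) × (String × Int) := (("'a'", 2), ("'", 2))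

-- ===== CLAIM (what is proved, stated in full; the proofs are below) =====
def Claim_unchanged_get_string_token_from_line : Prop := ∀ (line : String) (index : Int), Dom_get_string_token_from_line line index → Pre_get_string_token_from_line line index → Spec_get_string_token_from_line line index (get_string_token_from_line line index)
def Claim_changed_get_string_token_from_line : Prop := Dom_get_string_token_from_line (pvDiffWitness_get_string_token_from_line.1) (pvDiffWitness_get_string_token_from_line.2) ∧ Pre_get_string_token_from_line (pvDiffWitness_get_string_token_from_line.1) (pvDiffWitness_get_string_token_from_line.2) ∧ D_get_string_token_from_line (pvDiffWitness_get_string_token_from_line.1) (pvDiffWitness_get_string_token_from_line.2) ∧ get_string_token_from_line (pvDiffWitness_get_string_token_from_line.1) (pvDiffWitness_get_string_token_from_line.2) = pvDiffWitnessOut_get_string_token_from_line.1 ∧ get_string_token_from_line_alt (pvDiffWitness_get_string_token_from_line.1) (pvDiffWitness_get_string_token_from_line.2) = pvDiffWitnessOut_get_string_token_from_line.2 ∧ pvDiffWitnessOut_get_string_token_from_line.1 ≠ pvDiffWitnessOut_get_string_token_from_line.2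

-- ===== LEMMAS AND PROOFS =====

-- proof-only model of A's loop on the suffix line[index:], tracking (consumed chars, number consumed)
def pvLoop (t : List Char) (q : Nat) : List Char × Nat :=
  match t with
  | [] => ([], 0)
  | c :: t' =>
    if q < 2 then
      let r := pvLoop t' (if c = '\'' then q + 1 else q)
      (c :: r.1, r.2 + 1)
    else ([], 0)

lemma pvGoA_eq (cs : List Char) (t : List Char) : ∀ (n : Nat) (fuel : Nat) (acc : List Char) (q : Nat),
    cs.drop n = t → fuel = cs.length - n →
    pvGoA cs fuel (n : Int) acc q = (acc ++ (pvLoop t q).1, (n : Int) + ((pvLoop t q).2 : Int)) := by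
  induction t with
  | nil =>
    intro n fuel acc q hdrop hfuel
    have hlen : cs.length ≤ n := List.drop_eq_nil_iff.mp hdrop
    have hf0 : fuel = 0 := by omega
    subst hf0
    simp [pvGoA, pvLoop]
  | cons c t' ih =>
    intro n fuel acc q hdrop hfuel
    have hne : cs.drop n ≠ [] := by rw [hdrop]; simp
    have hn : n < cs.length := by
      by_contra hh
      exact hne (List.drop_eq_nil_iff.mpr (by omega))
    have hget : cs[n]? = some c := by
      have h0 : (cs.drop n)[0]? = some c := by rw [hdrop]; rfl
      simpa [List.getElem?_drop] using h0
    have hdrop' : cs.drop (n + 1) = t' := by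
      have ht : (cs.drop n).tail = t' := by rw [hdrop]; rfl
      simpa [List.tail_drop] using ht
    obtain ⟨fuel', rfl⟩ : ∃ f, fuel = f + 1 := ⟨fuel - 1, by omega⟩
    by_cases hq : q < 2
    · have hcond : ((n : Int) < (cs.length : Int) ∧ q < 2) := ⟨by exact_mod_cast hn, hq⟩
      rw [pvGoA, if_pos hcond, PySem.List.pyGet?_natCast, hget]
      have hcast : (n : Int) + 1 = ((n + 1 : Nat) : Int) := by push_cast; ring
      show pvGoA cs fuel' ((n : Int) + 1) (acc ++ [c]) (if c = '\'' then q + 1 else q) = _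
      rw [hcast, ih (n + 1) fuel' (acc ++ [c]) _ hdrop' (by omega)]
      simp only [pvLoop, if_pos hq]
      refine Prod.ext ?_ ?_
      · simp
      · simp; push_cast; ring
    · rw [pvGoA, if_neg (by tauto)]
      simp only [pvLoop, if_neg hq]
      simp

lemma pvSingleton_prefix_drop (t : List Char) (j : Nat) (a : Char) :
    [a] <+: t.drop j ↔ t[j]? = some a := by
  have hj : t[j]? = (t.drop j)[0]? := by simp [List.getElem?_drop]
  rw [hj]
  cases h : t.drop j with
  | nil => simp
  | cons c t' => simp [List.cons_prefix_cons]; tauto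

lemma pvSingleton_infix (t : List Char) (a : Char) : [a] <:+: t ↔ a ∈ t := by
  constructor
  · intro h; exact h.subset (List.mem_singleton_self a)
  · intro h
    obtain ⟨s, t', rfl⟩ := List.append_of_mem h
    exact ⟨s, t', by simp⟩

lemma pvFind_neg_iff (t : List Char) (a : Char) :
    PySem.Chars.find t [a] = -1 ↔ a ∉ t := by
  rw [PySem.Chars.find_eq_neg_one_iff, pvSingleton_infix]

lemma pvFind_unique (t : List Char) (a : Char) (j : Nat)
    (hj : t[j]? = some a) (hmin : ∀ i < j, t[i]? ≠ some a) :
    PySem.Chars.find t [a] = (j : Int) := by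
  have hmem : a ∈ t := List.mem_of_getElem? hj
  have h0 : 0 ≤ PySem.Chars.find t [a] := by
    rw [PySem.Chars.find_nonneg_iff, pvSingleton_infix]; exact hmem
  obtain ⟨hpre, hfm⟩ := PySem.Chars.find_spec h0
  rw [pvSingleton_prefix_drop] at hpre
  have hne1 : ¬ (PySem.Chars.find t [a]).toNat < j := fun hlt => hmin _ hlt hpre
  have hne2 : ¬ j < (PySem.Chars.find t [a]).toNat := fun hlt =>
    hfm j hlt ((pvSingleton_prefix_drop t j a).mpr hj)
  omega

lemma pvFind_cons_self (a : Char) (t : List Char) :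
    PySem.Chars.find (a :: t) [a] = 0 := by
  have := pvFind_unique (a :: t) a 0 (by simp) (by omega)
  simpa using this

lemma pvFind_cons_ne (c a : Char) (t : List Char) (hc : c ≠ a) :
    PySem.Chars.find (c :: t) [a] =
      if PySem.Chars.find t [a] = -1 then -1 else PySem.Chars.find t [a] + 1 := by
  split_ifs with hf
  · rw [pvFind_neg_iff] at hf ⊢
    intro h
    rcases List.mem_cons.mp h with h | h
    · exact hc h.symm
    · exact hf h
  · have h0 : 0 ≤ PySem.Chars.find t [a] := by
      have := PySem.Chars.neg_one_le_find t [a]; omega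
    have hfn : PySem.Chars.find t [a] = ((PySem.Chars.find t [a]).toNat : Int) :=
      (Int.toNat_of_nonneg h0).symm
    obtain ⟨hpre, hfm⟩ := PySem.Chars.find_spec h0
    rw [pvSingleton_prefix_drop] at hpre
    have := pvFind_unique (c :: t) a ((PySem.Chars.find t [a]).toNat + 1)
      (by simpa using hpre)
      (by
        intro i hi
        match i with
        | 0 => simpa using fun h => hc h
        | i + 1 =>
          have hi' : i < (PySem.Chars.find t [a]).toNat := by omega
          have := hfm i hi'
          rw [pvSingleton_prefix_drop] at this
          simpa using this)
    rw [this]; push_cast; omega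

lemma pvLoop_two (t : List Char) : pvLoop t 2 = ([], 0) := by
  cases t <;> simp [pvLoop]

lemma pvLoop_one (t : List Char) :
    pvLoop t 1 =
      if PySem.Chars.find t ['\''] = -1 then (t, t.length)
      else (t.take ((PySem.Chars.find t ['\'']).toNat + 1), (PySem.Chars.find t ['\'']).toNat + 1) := by
  induction t with
  | nil => simp [pvLoop, pvFind_neg_iff]
  | cons c t' ih =>
    by_cases hc : c = '\''
    · subst hc
      rw [pvFind_cons_self]
      simp [pvLoop, pvLoop_two]
    · rw [pvFind_cons_ne c '\'' t' hc]
      have hstep : pvLoop (c :: t') 1 = (c :: (pvLoop t' 1).1, (pvLoop t' 1).2 + 1) := by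
        simp [pvLoop, hc]
      by_cases hf : PySem.Chars.find t' ['\''] = -1
      · rw [if_pos hf, if_pos rfl, hstep, ih, if_pos hf]
        simp
      · have h0 : 0 ≤ PySem.Chars.find t' ['\''] := by
          have := PySem.Chars.neg_one_le_find t' ['\'']; omega
        have hne : ¬ (PySem.Chars.find t' ['\''] + 1 = -1) := by omega
        rw [if_neg hf, if_neg hne, hstep, ih, if_neg hf]
        have htn : (PySem.Chars.find t' ['\''] + 1).toNat = (PySem.Chars.find t' ['\'']).toNat + 1 := by omega
        refine Prod.ext ?_ ?_ <;> simp [htn]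

lemma pvLoop_zero (t : List Char) :
    pvLoop t 0 =
      if PySem.Chars.find t ['\''] = -1 then (t, t.length)
      else
        (t.take ((PySem.Chars.find t ['\'']).toNat + 1)
           ++ (pvLoop (t.drop ((PySem.Chars.find t ['\'']).toNat + 1)) 1).1,
         (PySem.Chars.find t ['\'']).toNat + 1
           + (pvLoop (t.drop ((PySem.Chars.find t ['\'']).toNat + 1)) 1).2) := by
  induction t with
  | nil => simp [pvLoop, pvFind_neg_iff]
  | cons c t' ih =>
    by_cases hc : c = '\''
    · subst hc
      rw [pvFind_cons_self]
      simp only [pvLoop]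
      norm_num
      omega
    · rw [pvFind_cons_ne c '\'' t' hc]
      have hstep : pvLoop (c :: t') 0 = (c :: (pvLoop t' 0).1, (pvLoop t' 0).2 + 1) := by
        simp [pvLoop, hc]
      by_cases hf : PySem.Chars.find t' ['\''] = -1
      · rw [if_pos hf, if_pos rfl, hstep, ih, if_pos hf]
        simp
      · have h0 : 0 ≤ PySem.Chars.find t' ['\''] := by
          have := PySem.Chars.neg_one_le_find t' ['\'']; omega
        have hne : ¬ (PySem.Chars.find t' ['\''] + 1 = -1) := by omega
        rw [if_neg hf, if_neg hne, hstep, ih, if_neg hf]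
        have htn : (PySem.Chars.find t' ['\''] + 1).toNat = (PySem.Chars.find t' ['\'']).toNat + 1 := by omega
        refine Prod.ext ?_ ?_ <;> simp [htn, List.take_succ_cons] <;> omega

lemma pvOfList_eq (l : List Char) (s : String) (h : s.toList = l) : String.ofList l = s := by
  rw [← h, String.ofList_toList]

lemma pvQuote_toList : ("'" : String).toList = ['\''] := rfl

theorem get_string_token_from_line_spec : Claim_unchanged_get_string_token_from_line := by
  intro line index hdom hpre hD
  have h0 : 0 ≤ index := by
    unfold D_get_string_token_from_line at hD
    omega
  obtain ⟨n, rfl⟩ : ∃ n : Nat, index = (n : Int) := ⟨index.toNat, (Int.toNat_of_nonneg h0).symm⟩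
  set cs := line.toList with hcs
  set L := cs.length with hL
  have hA : get_string_token_from_line line (n : Int)
      = (String.ofList (pvLoop (cs.drop n) 0).1, (n : Int) + ((pvLoop (cs.drop n) 0).2 : Int)) := by
    unfold get_string_token_from_line
    rw [show ((cs.length : Int) - (n : Int)).toNat = cs.length - n from by omega]
    rw [pvGoA_eq cs (cs.drop n) n (cs.length - n) [] 0 rfl rfl]
    simp
  by_cases hlen : L ≤ n
  · have hnil : cs.drop n = [] := List.drop_eq_nil_iff.mpr hlen
    rw [hA, hnil]
    unfold get_string_token_from_line_alt
    rw [if_pos (by rw [PySem.Str.len_eq]; exact_mod_cast hlen)]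
    simp [pvLoop]
  · push_neg at hlen
    unfold get_string_token_from_line_alt
    rw [if_neg (by rw [PySem.Str.len_eq]; push_neg; exact_mod_cast hlen)]
    simp only [PySem.Str.findFrom_eq, pvQuote_toList, ← hcs]
    rw [PySem.Chars.findFrom_natCast cs ['\''] n (by omega)]
    set t := cs.drop n with ht
    by_cases hf1 : PySem.Chars.find t ['\''] = -1
    · rw [if_pos hf1, if_pos rfl, hA]
      rw [pvLoop_zero, if_pos hf1]
      refine Prod.ext ?_ ?_
      · exact pvOfList_eq _ _ (by
          rw [PySem.Str.toList_slice]
          simp [PySem.Chars.slice_eq_listSlice, PySem.List.slice_from_natCast, ← hcs, ht])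
      · simp [PySem.Str.len_eq, ← hcs, ht]
        omega
    · have h01 : 0 ≤ PySem.Chars.find t ['\''] := by
        have := PySem.Chars.neg_one_le_find t ['\'']; omega
      set j1 := (PySem.Chars.find t ['\'']).toNat with hj1
      have hj1f : PySem.Chars.find t ['\''] = (j1 : Int) := by omega
      have hj1lt : j1 < t.length := by
        obtain ⟨hpre1, _⟩ := PySem.Chars.find_spec h01
        rw [pvSingleton_prefix_drop] at hpre1
        exact (List.getElem?_eq_some_iff.mp (by rwa [← hj1] at hpre1)).1
      have htlen : t.length = L - n := by simp [ht, hL]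
      rw [if_neg hf1, hj1f]
      rw [if_neg (by omega)]
      have hp1 : (n : Int) + (j1 : Int) + 1 = ((n + j1 + 1 : Nat) : Int) := by push_cast; ring
      rw [hp1, PySem.Chars.findFrom_natCast cs ['\''] (n + j1 + 1) (by omega)]
      have hdd : cs.drop (n + j1 + 1) = t.drop (j1 + 1) := by
        rw [ht, List.drop_drop]
        congr 1
      rw [hdd]
      by_cases hf2 : PySem.Chars.find (t.drop (j1 + 1)) ['\''] = -1
      · rw [if_pos hf2, if_pos rfl, hA]
        rw [pvLoop_zero, if_neg hf1, ← hj1, pvLoop_one, if_pos hf2]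
        refine Prod.ext ?_ ?_
        · refine pvOfList_eq _ _ ?_
          rw [PySem.Str.toList_slice]
          simp [PySem.Chars.slice_eq_listSlice, PySem.List.slice_from_natCast, ← hcs, ← ht]
        · simp [PySem.Str.len_eq, ← hcs]
          have : (t.drop (j1 + 1)).length = t.length - (j1 + 1) := by simp
          omega
      · have h02 : 0 ≤ PySem.Chars.find (t.drop (j1 + 1)) ['\''] := by
          have := PySem.Chars.neg_one_le_find (t.drop (j1 + 1)) ['\'']; omega
        set j2 := (PySem.Chars.find (t.drop (j1 + 1)) ['\'']).toNat with hj2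
        have hj2f : PySem.Chars.find (t.drop (j1 + 1)) ['\''] = (j2 : Int) := by omega
        have hj2lt : j2 < (t.drop (j1 + 1)).length := by
          obtain ⟨hpre2, _⟩ := PySem.Chars.find_spec h02
          rw [pvSingleton_prefix_drop] at hpre2
          exact (List.getElem?_eq_some_iff.mp (by rwa [← hj2] at hpre2)).1
        rw [if_neg hf2, hj2f]
        rw [if_neg (by omega)]
        rw [hA, pvLoop_zero, if_neg hf1, ← hj1, pvLoop_one, if_neg hf2, ← hj2]
        refine Prod.ext ?_ ?_
        · refine pvOfList_eq _ _ ?_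
          rw [PySem.Str.toList_slice]
          have hcast2 : ((n + j1 + 1 : Nat) : Int) + (j2 : Int) + 1 = ((n + j1 + 1 + j2 + 1 : Nat) : Int) := by push_cast; ring
          rw [hcast2]
          simp only [PySem.Chars.slice_eq_listSlice, ← hcs, PySem.List.slice_natCast]
          rw [show n + j1 + 1 + j2 + 1 - n = (j1 + 1) + (j2 + 1) from by omega]
          rw [← ht, List.take_add]
        · simp
          push_cast
          ring

theorem get_string_token_from_line_changed : Claim_changed_get_string_token_from_line := by
  unfold Claim_changed_get_string_token_from_line; decide
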